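-- pv_equiv track=rewrite | github.com/mohanpriya20/level-up-daily | stacks/06-predicting-cooler-days/solution.py | days_until_cooler
-- ===== SOURCE A (Python) =====
-- def days_until_cooler(temps):
--     """
--     For each day i, return how many days until a strictly cooler day (to the right).
--     If no cooler day exists, return -1. Uses a stack (monotonic, right-to-left scan).
--     """
--     result = [-1] * len(temps)
--     stack = []
--
--     for i in range(len(temps) - 1, -1, -1):
--         while stack and temps[stack[-1]] >= temps[i]:
--             stack.pop()
--         if not stack:
--             stack.append(i)
--         else:
--             if temps[stack[-1]] < temps[i]:
--                 result[i] = stack[-1] - i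
--                 stack.append(i)
--     return result
-- ===== SOURCE B (Python) =====
-- def days_until_cooler(temps):
--     """
--     For each day i, return how many days until a strictly cooler day (to the right).
--     If no cooler day exists, return -1. Direct scan: for each i, walk right and
--     return the distance to the first strictly cooler temperature.
--     """
--     n = len(temps)
--
--     def scan(ti, i, j):
--         while j < n:
--             if temps[j] < ti:
--                 return j - i
--             j += 1
--         return -1
--
--     return [scan(temps[i], i, i + 1) for i in range(n)]
-- ===== Notes on version B (the rewrite author's own statement) =====
-- stated objective: simpler
-- what changed: Replaces the right-to-left monotonic-stack pass (with in-place result mutation) by a direct per-index rightward scan: for each i, return the distance to the first j > i with temps[j] < temps[i], or -1.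
import Mathlib
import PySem

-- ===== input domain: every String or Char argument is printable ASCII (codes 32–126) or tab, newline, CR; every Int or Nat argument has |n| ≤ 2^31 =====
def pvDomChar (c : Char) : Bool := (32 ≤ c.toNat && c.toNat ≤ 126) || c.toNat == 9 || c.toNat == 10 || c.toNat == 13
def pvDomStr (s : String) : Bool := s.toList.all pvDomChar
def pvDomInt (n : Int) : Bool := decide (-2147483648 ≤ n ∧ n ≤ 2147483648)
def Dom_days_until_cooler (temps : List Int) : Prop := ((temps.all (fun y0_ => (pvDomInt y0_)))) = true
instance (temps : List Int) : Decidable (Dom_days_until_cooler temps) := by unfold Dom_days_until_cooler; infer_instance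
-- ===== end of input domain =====

-- B replaces A's right-to-left monotonic-stack pass by a direct per-index rightward
-- scan for the first strictly cooler temperature (simpler; not faster).

-- ===== PORT A =====
-- while stack and temps[stack[-1]] >= temps[i]: stack.pop()
-- (stack top = list head; all indices on the stack are in range, so the pyGetD default is never used)
def ducPop (temps : List Int) (ti : Int) : List Int → List Int
  | [] => []
  | top :: rest =>
    if PySem.List.pyGetD temps top 0 ≥ ti then ducPop temps ti rest
    else top :: rest

-- one iteration of A's 'for i in range(len(temps)-1, -1, -1)' body; state = (result, stack)
def ducStep (temps : List Int) (st : List Int × List Int) (i : Int) : List Int × List Int :=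
  let ti := PySem.List.pyGetD temps i 0
  let stack := ducPop temps ti st.2
  match stack with
  | [] => (st.1, i :: stack)
  | top :: _ =>
    if PySem.List.pyGetD temps top 0 < ti then
      (PySem.List.pySetD st.1 i (top - i), i :: stack)
    else (st.1, stack)

def days_until_cooler (temps : List Int) : List Int :=
  ((PySem.List.pyRange ((temps.length : Int) - 1) (-1) (-1)).foldl
    (ducStep temps)
    (List.replicate temps.length (-1), ([] : List Int))).1

-- ===== PORT B =====
-- the inner 'while j < n' scan of Source B (indices are in range wherever it reads; getD exact here)
def ducScan (temps : List Int) (ti : Int) (i j : Nat) : Int :=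
  if _h : j < temps.length then
    if temps.getD j 0 < ti then (j : Int) - (i : Int)
    else ducScan temps ti i (j + 1)
  else -1
termination_by temps.length - j

def days_until_cooler_alt (temps : List Int) : List Int :=
  (List.range temps.length).map (fun i => ducScan temps (temps.getD i 0) i (i + 1))

-- ===== PRECONDITION & SPEC =====
def Spec_days_until_cooler (temps : List Int) (out : List Int) : Prop := out = days_until_cooler_alt temps
instance (temps : List Int) (out : List Int) : Decidable (Spec_days_until_cooler temps out) := by unfold Spec_days_until_cooler; infer_instance

-- ===== CLAIM (what is proved, stated in full; the proofs are below) =====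
def Claim_equal_days_until_cooler : Prop := ∀ (temps : List Int), Dom_days_until_cooler temps → Spec_days_until_cooler temps (days_until_cooler temps)

-- ===== LEMMAS AND PROOFS =====

-- first index k ≥ j with temps[k] < t (proof-side characterisation of B's scan)
def ducFirst (temps : List Int) (t : Int) (j : Nat) : Option Nat :=
  if _h : j < temps.length then
    if temps.getD j 0 < t then some j else ducFirst temps t (j + 1)
  else none
termination_by temps.length - j

-- the stack A holds after having processed indices n-1 … i (top = head)
def ducStack (temps : List Int) (i : Nat) : List Nat :=
  if _h : i < temps.length then
    i :: (ducStack temps (i + 1)).dropWhile (fun j => temps.getD i 0 ≤ temps.getD j 0)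
  else []
termination_by temps.length - i

-- the result list after having processed indices n-1 … i
def ducRes (temps : List Int) (i : Nat) : List Int :=
  (List.range temps.length).map
    (fun k => if i ≤ k then ducScan temps (temps.getD k 0) k (k + 1) else -1)

lemma ducScan_eq_first (temps : List Int) (t : Int) (i j : Nat) :
    ducScan temps t i j =
      (match ducFirst temps t j with
       | some k => (k : Int) - (i : Int)
       | none => -1) := by
  fun_induction ducScan temps t i j with
  | case1 j h hlt =>
    rw [List.getD_eq_getElem temps 0 h] at hlt
    rw [ducFirst]; simp [h, hlt]
  | case2 j h hlt ih =>
    rw [List.getD_eq_getElem temps 0 h] at hlt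
    rw [ducFirst]; simp [h, hlt, ih]
  | case3 j h => rw [ducFirst]; simp [h]

lemma ducPop_map (temps : List Int) (t : Int) (l : List Nat) :
    ducPop temps t (l.map (fun (j : Nat) => (j : Int))) =
      (l.dropWhile (fun j => t ≤ temps.getD j 0)).map (fun (j : Nat) => (j : Int)) := by
  induction l with
  | nil => rfl
  | cons x tl ih =>
    rw [List.map_cons, ducPop, PySem.List.pyGetD_natCast, List.dropWhile_cons]
    by_cases hx : t ≤ temps.getD x 0
    · rw [if_pos hx, if_pos (by simpa using hx), ih]
    · rw [if_neg hx, if_neg (by simpa using hx), List.map_cons]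

lemma dropWhile_dropWhile_imp {α : Type} (p q : α → Bool) (l : List α)
    (h : ∀ x, q x = true → p x = true) :
    (l.dropWhile q).dropWhile p = l.dropWhile p := by
  induction l with
  | nil => rfl
  | cons x tl ih =>
    by_cases hq : q x = true
    · simp [hq, h x hq, ih]
    · simp [List.dropWhile_cons, hq]

lemma duc_key (temps : List Int) (t : Int) (i : Nat) :
    ((ducStack temps i).dropWhile (fun j => t ≤ temps.getD j 0)).head? =
      ducFirst temps t i := by
  fun_induction ducStack temps i with
  | case1 i h ih =>
    rw [ducFirst, dif_pos h, List.dropWhile_cons]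
    by_cases ht : t ≤ temps.getD i 0
    · have himp : ∀ j : Nat,
          (decide (temps.getD i 0 ≤ temps.getD j 0)) = true →
          (decide (t ≤ temps.getD j 0)) = true := by
        intro j hj
        simp only [decide_eq_true_eq] at hj ⊢
        exact le_trans ht hj
      rw [if_pos (by simpa using ht), dropWhile_dropWhile_imp _ _ _ himp, ih,
        if_neg (not_lt.mpr ht)]
    · rw [if_neg (by simpa using ht), if_pos (lt_of_not_ge ht)]
      simp
  | case2 i h => rw [ducFirst]; simp [h]

lemma set_map_range {n i : Nat} (f : Nat → Int) (v : Int) (_hi : i < n) :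
    ((List.range n).map f).set i v =
      (List.range n).map (fun k => if k = i then v else f k) := by
  apply List.ext_getElem
  · simp
  · intro k h1 h2
    simp only [List.getElem_set, List.getElem_map, List.getElem_range]
    by_cases hk : k = i
    · simp [hk]
    · simp [hk, Ne.symm hk]

lemma ducFirst_lt (temps : List Int) (t : Int) (j k : Nat)
    (h : ducFirst temps t j = some k) : temps.getD k 0 < t := by
  fun_induction ducFirst temps t j with
  | case1 j hj hlt => cases h; exact hlt
  | case2 j hj hlt ih => exact ih h
  | case3 j hj => cases h

lemma duc_step_eq (temps : List Int) (i : Nat) (hi : i < temps.length) :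
    ducStep temps (ducRes temps (i + 1), (ducStack temps (i + 1)).map (fun (j : Nat) => (j : Int))) (i : Int)
      = (ducRes temps i, (ducStack temps i).map (fun (j : Nat) => (j : Int))) := by
  have hfix : ducStack temps i
      = i :: (ducStack temps (i + 1)).dropWhile
          (fun j => temps.getD i 0 ≤ temps.getD j 0) := by
    rw [ducStack, dif_pos hi]
  have hkey := duc_key temps (temps.getD i 0) (i + 1)
  simp only [ducStep, PySem.List.pyGetD_natCast, ducPop_map]
  set d := (ducStack temps (i + 1)).dropWhile
      (fun j => temps.getD i 0 ≤ temps.getD j 0) with hd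
  match hdm : d with
  | [] =>
    -- no strictly cooler day to the right of i: result[i] stays -1
    simp only [List.map_nil]
    have hBi : ducScan temps (temps.getD i 0) i (i + 1) = -1 := by
      rw [ducScan_eq_first, ← hkey]; rfl
    have hres : ducRes temps (i + 1) = ducRes temps i := by
      unfold ducRes
      refine List.map_congr_left ?_
      intro k hk
      by_cases hki : k = i
      · subst hki; rw [if_neg (by omega), if_pos (le_refl _), hBi]
      · by_cases hik : i ≤ k
        · have : i + 1 ≤ k := by omega
          simp [hik, this]
        · have : ¬ (i + 1 ≤ k) := by omega
          simp [hik, this]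
    rw [hres, hfix]
    rfl
  | top :: rest =>
    simp only [List.head?_cons] at hkey
    have htop : temps.getD top 0 < temps.getD i 0 :=
      ducFirst_lt temps (temps.getD i 0) (i + 1) top hkey.symm
    simp only [List.map_cons, PySem.List.pyGetD_natCast, if_pos htop,
      PySem.List.pySetD_natCast]
    have hBi : ducScan temps (temps.getD i 0) i (i + 1) = (top : Int) - (i : Int) := by
      rw [ducScan_eq_first, ← hkey]
    have hres : (ducRes temps (i + 1)).set i ((top : Int) - (i : Int)) = ducRes temps i := by
      unfold ducRes
      rw [set_map_range _ _ hi]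
      refine List.map_congr_left ?_
      intro k hk
      by_cases hki : k = i
      · subst hki; rw [if_pos rfl, if_pos (le_refl _), hBi]
      · by_cases hik : i ≤ k
        · have : i + 1 ≤ k := by omega
          simp [hki, hik, this]
        · have : ¬ (i + 1 ≤ k) := by omega
          simp [hki, hik, this]
    rw [hres, hfix]
    rfl

lemma duc_main (temps : List Int) (i : Nat) (hi : i ≤ temps.length) :
    (PySem.List.pyRange ((i : Int) - 1) (-1) (-1)).foldl (ducStep temps)
      (ducRes temps i, (ducStack temps i).map (fun (j : Nat) => (j : Int)))
      = (ducRes temps 0, (ducStack temps 0).map (fun (j : Nat) => (j : Int))) := by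
  induction i with
  | zero =>
    rw [show ((0 : Nat) : Int) - 1 = -1 by norm_num,
      PySem.List.pyRange_neg_one_eq_nil (le_refl (-1))]
    rfl
  | succ i ih =>
    have hi' : i < temps.length := hi
    rw [show ((i + 1 : Nat) : Int) - 1 = (i : Int) by push_cast; ring,
      PySem.List.pyRange_neg_one_cons (by omega)]
    rw [List.foldl_cons, duc_step_eq temps i hi']
    exact ih (le_of_lt hi')

-- ===== VERDICT (by name: the statement is the Claim_ definition above) =====
theorem days_until_cooler_spec : Claim_equal_days_until_cooler := by
  intro temps _
  unfold Spec_days_until_cooler days_until_cooler days_until_cooler_alt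
  have hstart₁ : List.replicate temps.length (-1 : Int) = ducRes temps temps.length := by
    unfold ducRes
    rw [List.map_congr_left (f := fun k => if temps.length ≤ k then
        ducScan temps (temps.getD k 0) k (k + 1) else -1) (g := fun _ => (-1 : Int))
      (by intro k hk; simp [Nat.not_le.mpr (List.mem_range.mp hk)])]
    rw [List.map_const', List.length_range]
  have hstart₂ : ([] : List Int)
      = (ducStack temps temps.length).map (fun (j : Nat) => (j : Int)) := by
    rw [ducStack, dif_neg (lt_irrefl temps.length)]
    rfl
  rw [hstart₁, hstart₂, duc_main temps temps.length (le_refl _)]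
  unfold ducRes
  refine List.map_congr_left ?_
  intro k _
  simp
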